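-- pv_equiv track=rewrite | github.com/dmitryluko/UrbanUniversityPython | Chapter_2/module_2_3.py | get_positive_numbers
-- ===== SOURCE A (Python) =====
-- def get_positive_numbers(my_list: list) -> list:
--     output_list = []
--
--     for item in my_list:
--         if item > 0:
--             output_list.append(item)
--             continue
--
--         elif item < 0:
--             break
--
--     return output_list
-- ===== SOURCE B (Python) =====
-- def get_positive_numbers(my_list: list) -> list:
--     # Structural recursion: the result for x::rest is built from the result
--     # for rest by cons-ing x in front (no accumulator, no loop, no break).
--     def go(xs):
--         if not xs or xs[0] < 0:
--             return []
--         tail = go(xs[1:])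
--         return [xs[0]] + tail if xs[0] > 0 else tail
--     return go(my_list)
-- ===== Notes on version B (the rewrite author's own statement) =====
-- stated objective: alternative
-- what changed: Replaced A's forward loop with an append-accumulator and break by a structural recursion that builds the result back-to-front by cons-ing each positive head onto the recursive result for the tail.
import Mathlib
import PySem

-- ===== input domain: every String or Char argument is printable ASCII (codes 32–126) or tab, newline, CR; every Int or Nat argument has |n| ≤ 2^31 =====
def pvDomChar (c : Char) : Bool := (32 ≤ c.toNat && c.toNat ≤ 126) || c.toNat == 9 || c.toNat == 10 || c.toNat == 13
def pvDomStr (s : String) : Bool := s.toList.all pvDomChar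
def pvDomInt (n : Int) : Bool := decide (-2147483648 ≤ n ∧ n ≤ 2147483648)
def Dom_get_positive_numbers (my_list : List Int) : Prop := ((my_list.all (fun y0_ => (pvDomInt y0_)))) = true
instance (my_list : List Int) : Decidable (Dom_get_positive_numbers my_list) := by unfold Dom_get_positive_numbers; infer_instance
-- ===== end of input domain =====

-- B replaces A's forward append-accumulator loop with break by a structural recursion
-- that conses each positive head onto the recursive result for the tail (alternative decomposition).


-- ===== PORT A =====
-- Port of A: forward loop with an append-accumulator, break at first negative.
def get_positive_numbers_loop (acc : List Int) (l : List Int) : List Int :=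
  match l with
  | [] => acc
  | item :: rest =>
    if item > 0 then get_positive_numbers_loop (acc ++ [item]) rest
    else if item < 0 then acc
    else get_positive_numbers_loop acc rest

def get_positive_numbers (my_list : List Int) : List Int :=
  get_positive_numbers_loop [] my_list

-- ===== PORT B =====
-- Port of B's helper go: structural recursion, cons the positive head onto the tail's result.
def gpn_go : List Int → List Int
  | [] => []
  | x :: xs =>
    if x < 0 then []
    else
      let tail := gpn_go xs
      if x > 0 then x :: tail else tail

def get_positive_numbers_alt (my_list : List Int) : List Int := gpn_go my_list

-- ===== PRECONDITION & SPEC =====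
def Spec_get_positive_numbers (my_list : List Int) (out : List Int) : Prop := out = get_positive_numbers_alt my_list
instance (my_list : List Int) (out : List Int) : Decidable (Spec_get_positive_numbers my_list out) := by unfold Spec_get_positive_numbers; infer_instance

-- ===== CLAIM =====
def Claim_equal_get_positive_numbers : Prop := ∀ (my_list : List Int), Dom_get_positive_numbers my_list → Spec_get_positive_numbers my_list (get_positive_numbers my_list)

-- ===== LEMMAS AND PROOFS =====
theorem loop_eq (l : List Int) (acc : List Int) :
    get_positive_numbers_loop acc l = acc ++ gpn_go l := by
  induction l generalizing acc with
  | nil => simp [get_positive_numbers_loop, gpn_go]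
  | cons item rest ih =>
    by_cases h : item > 0
    · have h' : ¬ item < 0 := by omega
      simp [get_positive_numbers_loop, gpn_go, h, h', ih]
    · by_cases h2 : item < 0
      · simp [get_positive_numbers_loop, gpn_go, h, h2]
      · simp [get_positive_numbers_loop, gpn_go, h, h2, ih]

-- ===== VERDICT =====
theorem get_positive_numbers_spec : Claim_equal_get_positive_numbers := by
  intro l _
  unfold Spec_get_positive_numbers get_positive_numbers get_positive_numbers_alt
  simpa using loop_eq l []
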